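-- pv_equiv track=rewrite | github.com/ngiengkianyew/daily-coding-problem | solutions/problem_76.py | get_col_rem_count
-- ===== SOURCE A (Python) =====
-- def get_col_rem_count(matrix):
--     if not matrix:
--         return 0
--
--     rows = len(matrix)
--     if rows == 1:
--         return 0
--
--     cols = len(matrix[0])
--
--     col_drop_count = 0
--     for i in range(cols):
--         for k in range(1, rows):
--             if matrix[k][i] < matrix[k-1][i]:
--                 col_drop_count += 1
--                 break
--
--     return col_drop_count
-- ===== SOURCE B (Python) =====
-- def get_col_rem_count(matrix):
--     if len(matrix) < 2:
--         return 0
--     ok = [True] * len(matrix[0])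
--     for prev, cur in zip(matrix, matrix[1:]):
--         ok = [o and not (c < p) for o, p, c in zip(ok, prev, cur)]
--     return len(ok) - sum(ok)
-- ===== Notes on version B (the rewrite author's own statement) =====
-- stated objective: alternative
-- what changed: B replaces A's column-major double loop with early break by a single row-major sweep over adjacent row pairs that maintains a per-column 'still sorted' boolean vector and returns cols minus the number of surviving columns.
-- outside the precondition, e.g. on get_col_rem_count([[1, 2], [0, 1], [0]]): A returns 2, B returns 1
import Mathlib
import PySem

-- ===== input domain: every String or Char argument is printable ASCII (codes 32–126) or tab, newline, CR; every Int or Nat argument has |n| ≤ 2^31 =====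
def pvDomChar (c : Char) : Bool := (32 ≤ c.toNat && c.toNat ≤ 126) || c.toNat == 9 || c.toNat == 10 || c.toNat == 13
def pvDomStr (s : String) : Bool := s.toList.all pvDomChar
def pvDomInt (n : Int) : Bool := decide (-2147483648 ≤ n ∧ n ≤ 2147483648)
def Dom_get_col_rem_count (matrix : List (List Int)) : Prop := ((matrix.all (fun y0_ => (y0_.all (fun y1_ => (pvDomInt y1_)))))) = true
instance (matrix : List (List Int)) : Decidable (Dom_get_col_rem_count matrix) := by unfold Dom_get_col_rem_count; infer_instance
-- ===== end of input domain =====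

-- B is an alternative algorithm of the same cost: one row-major sweep keeping a per-column
-- "still sorted" boolean vector, instead of A's column-major scans with early break.

-- ===== PORT A =====
-- matrix[k][i] (both indices in range on every input Pre_ admits; default only fires outside Pre_)
def pvCell (m : List (List Int)) (k i : Int) : Int :=
  PySem.List.pyGetD (PySem.List.pyGetD m k []) i 0

-- inner loop 'for k in range(1, rows): if matrix[k][i] < matrix[k-1][i]: …; break'
def pvDropA (m : List (List Int)) (i : Int) : List Int → Bool
  | [] => false
  | k :: ks => if pvCell m k i < pvCell m (k - 1) i then true else pvDropA m i ks

def get_col_rem_count (matrix : List (List Int)) : Int :=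
  if matrix = [] then 0
  else
    let rows : Int := matrix.length
    if rows = 1 then 0
    else
      let cols : Int := (PySem.List.pyGetD matrix 0 []).length
      (PySem.List.pyRange 0 cols 1).foldl
        (fun acc i =>
          if pvDropA matrix i (PySem.List.pyRange 1 rows 1) then acc + 1 else acc) 0

-- ===== PORT B =====
-- ok = [o and not (c < p) for o, p, c in zip(ok, prev, cur)]
def pvOkStep (ok : List Bool) (prev cur : List Int) : List Bool :=
  (ok.zip (prev.zip cur)).map (fun x => x.1 && !(decide (x.2.2 < x.2.1)))

def get_col_rem_count_alt (matrix : List (List Int)) : Int :=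
  if matrix.length < 2 then 0
  else
    let okF := (matrix.zip matrix.tail).foldl
      (fun ok pc => pvOkStep ok pc.1 pc.2)
      (List.replicate (matrix.headD []).length true)
    (okF.length : Int) - (okF.countP id : Int)

-- ===== PRECONDITION & SPEC =====
-- Pre_ excludes jagged matrices in which some row is shorter than the first row: there A
-- usually raises IndexError, and where it does return, the value depends on which columns
-- happened to break before the short row was reached — an artefact of A's early-break order,
-- as accidental as B's zip-truncation value there.
def Pre_get_col_rem_count (matrix : List (List Int)) : Prop :=
  matrix.length ≤ 1 ∨ ∀ row ∈ matrix, (matrix.headD []).length ≤ row.length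

instance (matrix : List (List Int)) : Decidable (Pre_get_col_rem_count matrix) := by
  unfold Pre_get_col_rem_count; infer_instance

def pvWitness_get_col_rem_count : List (List Int) := [[1, 2], [3, 1]]

def Spec_get_col_rem_count (matrix : List (List Int)) (out : Int) : Prop :=
  out = get_col_rem_count_alt matrix
instance (matrix : List (List Int)) (out : Int) : Decidable (Spec_get_col_rem_count matrix out) := by
  unfold Spec_get_col_rem_count; infer_instance

-- ===== CLAIM (what is proved, stated in full; the proofs are below) =====
def Claim_equal_get_col_rem_count : Prop := ∀ (matrix : List (List Int)),
  Dom_get_col_rem_count matrix → Pre_get_col_rem_count matrix →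
  Spec_get_col_rem_count matrix (get_col_rem_count matrix)

-- ===== LEMMAS AND PROOFS =====

-- reference predicate: column i drops somewhere along the list of adjacent row pairs
def pvColBad (pairs : List (List Int × List Int)) (i : Nat) : Bool :=
  pairs.any (fun pc => decide (pc.2.getD i 0 < pc.1.getD i 0))

theorem pvColBad_cons (pc : List Int × List Int) (ps : List (List Int × List Int)) (i : Nat) :
    pvColBad (pc :: ps) i = (decide (pc.2.getD i 0 < pc.1.getD i 0) || pvColBad ps i) := rfl

-- A's inner loop over range(j, rows) equals pvColBad on the pair list of the suffix drop (j-1)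
theorem pvDropA_eq (m : List (List Int)) (i : Nat) (d : Nat) :
    ∀ j : Nat, 1 ≤ j → m.length = j + d →
      pvDropA m (i : Int) (PySem.List.pyRange (j : Int) (m.length : Int) 1)
        = pvColBad ((m.drop (j - 1)).zip (m.drop j)) i := by
  induction d with
  | zero =>
      intro j hj hlen
      rw [PySem.List.pyRange_one_eq_nil (by omega)]
      have : m.drop j = [] := List.drop_eq_nil_of_le (by omega)
      simp [pvDropA, this, pvColBad]
  | succ d ih =>
      intro j hj hlen
      rw [PySem.List.pyRange_one_cons (by exact_mod_cast (by omega : (j : Int) < (m.length : Int)))]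
      have hj1 : j - 1 < m.length := by omega
      have hjm : j < m.length := by omega
      have hd1 : m.drop (j - 1) = m[j - 1] :: m.drop j := by
        rw [List.drop_eq_getElem_cons hj1, show j - 1 + 1 = j from by omega]
      have hd2 : m.drop j = m[j] :: m.drop (j + 1) :=
        List.drop_eq_getElem_cons hjm
      have hcell : pvCell m (j : Int) i = m[j].getD i 0 := by
        simp [pvCell, List.getD, hjm]
      have hcell' : pvCell m ((j : Int) - 1) i = m[j - 1].getD i 0 := by
        have : ((j : Int) - 1) = ((j - 1 : Nat) : Int) := by omega
        rw [this]
        simp [pvCell, List.getD, hj1]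
      rw [hd1, hd2]
      simp only [pvDropA, hcell, hcell', List.zip_cons_cons, pvColBad_cons]
      have hrec := ih (j + 1) (by omega) (by omega)
      simp only [Nat.add_sub_cancel] at hrec
      rw [hd2] at hrec
      push_cast at hrec
      by_cases h : m[j].getD i 0 < m[j - 1].getD i 0
      · rw [if_pos h, decide_eq_true h, Bool.true_or]
      · rw [if_neg h, decide_eq_false h, Bool.false_or]
        exact hrec

-- counting fold = countP
theorem pvFoldl_count {α : Type} (p : α → Bool) (l : List α) (acc : Int) :
    l.foldl (fun acc x => if p x then acc + 1 else acc) acc = acc + l.countP p := by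
  induction l generalizing acc with
  | nil => simp
  | cons x xs ih =>
      by_cases h : p x <;> simp [h, ih]; omega

-- one B step, pointwise, when lengths suffice
theorem pvOkStep_getD (ok : List Bool) (p c : List Int) (cols : Nat)
    (hok : ok.length = cols) (hp : cols ≤ p.length) (hc : cols ≤ c.length) :
    (pvOkStep ok p c).length = cols ∧
      ∀ i, i < cols →
        (pvOkStep ok p c).getD i false
          = (ok.getD i false && !(decide (c.getD i 0 < p.getD i 0))) := by
  constructor
  · simp [pvOkStep]; omega
  · intro i hi
    have hlen : (pvOkStep ok p c).length = cols := by simp [pvOkStep]; omega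
    have hi' : i < (pvOkStep ok p c).length := by omega
    rw [List.getD_eq_getElem _ _ hi']
    simp only [pvOkStep, List.getElem_map, List.getElem_zip]
    rw [List.getD_eq_getElem _ _ (by omega), List.getD_eq_getElem _ _ (by omega),
        List.getD_eq_getElem _ _ (by omega)]

-- B's fold, pointwise
theorem pvFoldl_okStep (pairs : List (List Int × List Int)) (cols : Nat) :
    ∀ ok : List Bool, ok.length = cols →
      (∀ pc ∈ pairs, cols ≤ pc.1.length ∧ cols ≤ pc.2.length) →
      (pairs.foldl (fun ok pc => pvOkStep ok pc.1 pc.2) ok).length = cols ∧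
        ∀ i, i < cols →
          (pairs.foldl (fun ok pc => pvOkStep ok pc.1 pc.2) ok).getD i false
            = (ok.getD i false && !(pvColBad pairs i)) := by
  induction pairs with
  | nil => intro ok hok _; exact ⟨hok, fun i _ => by simp [pvColBad]⟩
  | cons pc ps ih =>
      intro ok hok hlen
      have hpc := hlen pc (List.mem_cons_self ..)
      have hstep := pvOkStep_getD ok pc.1 pc.2 cols hok hpc.1 hpc.2
      have hrec := ih (pvOkStep ok pc.1 pc.2) hstep.1
        (fun q hq => hlen q (List.mem_cons_of_mem _ hq))
      refine ⟨hrec.1, fun i hi => ?_⟩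
      rw [List.foldl_cons, hrec.2 i hi, hstep.2 i hi, pvColBad_cons]
      cases ok.getD i false <;> cases pvColBad ps i <;>
        cases h : decide (pc.2.getD i 0 < pc.1.getD i 0) <;> simp

-- main case: matrix nonempty, ≥ 2 rows, rectangular enough
theorem pv_main (m : List (List Int)) (hne : m ≠ []) (h2 : 2 ≤ m.length)
    (hpre : ∀ row ∈ m, (m.headD []).length ≤ row.length) :
    get_col_rem_count m = get_col_rem_count_alt m := by
  let cols : Nat := (m.headD []).length
  let pairs : List (List Int × List Int) := m.zip m.tail
  -- A side
  have hA : get_col_rem_count m = ((List.range cols).countP (fun i => pvColBad pairs i) : Int) := by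
    unfold get_col_rem_count
    rw [if_neg hne, if_neg (by
      intro h
      have : m.length = 1 := by exact_mod_cast h
      omega)]
    have h0 : PySem.List.pyGetD m 0 [] = m.headD [] := by
      cases m with
      | nil => simp at hne
      | cons a t => simp [PySem.List.pyGetD_zero]
    simp only [h0]
    have hzip : m.drop 0 = m ∧ m.drop 1 = m.tail := by
      constructor <;> simp [List.drop_one]
    have hdrop : ∀ i : Nat,
        pvDropA m (i : Int) (PySem.List.pyRange 1 (m.length : Int) 1) = pvColBad pairs i := by
      intro i
      have := pvDropA_eq m i (m.length - 1) 1 (by omega) (by omega)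
      simpa [hzip.1, hzip.2, pairs] using this
    rw [PySem.List.pyRange_zero_nat, List.foldl_map]
    simp only [hdrop]
    have h' := pvFoldl_count (fun i : Nat => pvColBad pairs i)
      (List.range ((m.headD []).length)) 0
    rw [zero_add] at h'
    exact h'
  -- B side
  have hlenp : ∀ pc ∈ pairs, cols ≤ pc.1.length ∧ cols ≤ pc.2.length := by
    intro pc hpc
    have h1 : pc.1 ∈ m := List.of_mem_zip hpc |>.1
    have h2' : pc.2 ∈ m.tail := List.of_mem_zip hpc |>.2
    exact ⟨hpre _ h1, hpre _ (List.mem_of_mem_tail h2')⟩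
  have hfold := pvFoldl_okStep pairs cols (List.replicate cols true) (by simp) hlenp
  have hB : get_col_rem_count_alt m
      = (cols : Int) - ((List.range cols).countP (fun i => !(pvColBad pairs i)) : Int) := by
    unfold get_col_rem_count_alt
    rw [if_neg (by omega)]
    set okF := pairs.foldl (fun ok pc => pvOkStep ok pc.1 pc.2) (List.replicate cols true) with hokF
    have hokeq : okF = (List.range cols).map (fun i => !(pvColBad pairs i)) := by
      apply List.ext_getElem
      · simp [hfold.1]
      · intro i hi1 hi2
        have hic : i < cols := by simpa [hfold.1] using hi1
        have := hfold.2 i hic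
        rw [List.getD_eq_getElem _ _ (by omega), List.getD_eq_getElem _ _ (by simp; omega)] at this
        simpa using this
    rw [hokeq]
    simp [List.countP_map]
  have hcount : (List.range cols).countP (fun i => pvColBad pairs i)
      + (List.range cols).countP (fun i => !(pvColBad pairs i)) = cols := by
    have := List.length_eq_countP_add_countP (l := List.range cols)
      (p := fun i => pvColBad pairs i)
    simpa [Bool.not_eq_true'] using this.symm
  rw [hA, hB]
  omega

-- ===== VERDICT (by name: the statement is the Claim_ definition above) =====
theorem get_col_rem_count_spec : Claim_equal_get_col_rem_count := by
  intro m _ hpre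
  unfold Spec_get_col_rem_count
  rcases hpre with h1 | hrect
  · -- ≤ 1 row: both return 0
    match m, h1 with
    | [], _ => rfl
    | [r], _ => rfl
  · by_cases h2 : 2 ≤ m.length
    · exact pv_main m (by rintro rfl; simp at h2) h2 hrect
    · match m with
      | [] => rfl
      | [r] => rfl
      | a :: b :: t => simp at h2
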